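-- pv_equiv track=rewrite | github.com/TiksGal/CodeAcademy | 03.14/magic_numbers.py | is_magic_number
-- ===== SOURCE A (Python) =====
-- def is_magic_number(num: int) -> bool:
--     if num <= 9:
--         return num == 1
--     else:
--         sum_of_digits = 0
--         while num > 0:
--             sum_of_digits += num % 10
--             num //= 10
--         return is_magic_number(sum_of_digits)
-- ===== SOURCE B (Python) =====
-- def is_magic_number(num: int) -> bool:
--     # closed form: for num >= 10 the digital root is 1 exactly when num % 9 == 1
--     if num <= 9:
--         return num == 1
--     return num % 9 == 1
-- ===== Notes on version B (the rewrite author's own statement) =====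
-- stated objective: simpler
-- what changed: replaces A's repeated digit-sum loop-and-recurse with the closed-form digital-root congruence test (num mod 9 equals 1), keeping A's base case for small and negative inputs unchanged
import Mathlib
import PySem

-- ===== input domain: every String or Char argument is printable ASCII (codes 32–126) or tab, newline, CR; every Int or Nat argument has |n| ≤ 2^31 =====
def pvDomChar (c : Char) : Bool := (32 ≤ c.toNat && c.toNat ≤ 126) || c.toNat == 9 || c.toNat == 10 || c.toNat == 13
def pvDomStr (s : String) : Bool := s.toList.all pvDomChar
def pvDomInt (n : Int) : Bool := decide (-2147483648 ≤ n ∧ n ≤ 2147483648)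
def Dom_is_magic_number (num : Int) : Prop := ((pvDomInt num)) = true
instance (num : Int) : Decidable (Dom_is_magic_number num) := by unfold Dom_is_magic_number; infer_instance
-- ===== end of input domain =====

-- B replaces A's repeated digit-sum recursion by the closed-form test num % 9 == 1 (same num <= 9 base case).

-- ===== PORT A =====
-- the inner `while num > 0:` digit-sum loop of A; the Nat argument is only a totality guard
-- (fuel; num.toNat steps always suffice, proved below), the computation is A's loop step for step
def pvDigitLoop : Nat → Int → Int → Int
  | 0, _, sum_of_digits => sum_of_digits
  | fuel + 1, num, sum_of_digits =>
    if num > 0 then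
      pvDigitLoop fuel (PySem.Int.floordiv num 10) (sum_of_digits + PySem.Int.mod num 10)
    else sum_of_digits

-- A's outer recursion, again with a fuel totality guard (num strictly decreases, so num.toNat suffices)
def pvMagicGo : Nat → Int → Bool
  | 0, num => num == 1
  | fuel + 1, num =>
    if num ≤ 9 then num == 1
    else pvMagicGo fuel (pvDigitLoop num.toNat num 0)

def is_magic_number (num : Int) : Bool := pvMagicGo num.toNat num

-- ===== PORT B =====
def is_magic_number_alt (num : Int) : Bool :=
  if num ≤ 9 then num == 1
  else PySem.Int.mod num 9 == 1

-- ===== PRECONDITION & SPEC =====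
def Spec_is_magic_number (num : Int) (out : Bool) : Prop := out = is_magic_number_alt num
instance (num : Int) (out : Bool) : Decidable (Spec_is_magic_number num out) := by unfold Spec_is_magic_number; infer_instance

-- ===== CLAIM (what is proved, stated in full; the proofs are below) =====
def Claim_equal_is_magic_number : Prop := ∀ (num : Int), Dom_is_magic_number num → Spec_is_magic_number num (is_magic_number num)

-- ===== LEMMAS AND PROOFS =====
theorem pvDigitLoop_zero (f : Nat) (s : Int) : pvDigitLoop f 0 s = s := by
  cases f <;> simp [pvDigitLoop]

-- the digit-sum loop: accumulator shift, positivity, value mod 9, and strict decrease for num ≥ 10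
theorem pvDigitLoop_facts : ∀ (f : Nat) (n s : Int), 0 < n → n.toNat ≤ f →
    pvDigitLoop f n s = s + pvDigitLoop f n 0 ∧ 1 ≤ pvDigitLoop f n 0 ∧
      pvDigitLoop f n 0 % 9 = n % 9 ∧ pvDigitLoop f n 0 ≤ n ∧
      (10 ≤ n → pvDigitLoop f n 0 < n) := by
  intro f
  induction f with
  | zero => intro n s hn hf; omega
  | succ f ih =>
    intro n s hn hf
    rw [pvDigitLoop, pvDigitLoop, if_pos hn, if_pos hn,
      PySem.Int.floordiv_eq_ediv_of_pos (by omega : (0:Int) < 10),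
      PySem.Int.mod_eq_emod_of_pos (by omega : (0:Int) < 10)]
    by_cases h9 : n ≤ 9
    · have hq : n / 10 = 0 := by omega
      rw [hq, pvDigitLoop_zero, pvDigitLoop_zero]
      omega
    · have hq : 0 < n / 10 := by omega
      have hfu : (n / 10).toNat ≤ f := by omega
      have h1 := ih (n / 10) (s + n % 10) hq hfu
      have h2 := ih (n / 10) (0 + n % 10) hq hfu
      omega

theorem pvMagicGo_eq_alt : ∀ (f : Nat) (n : Int), n.toNat ≤ f →
    pvMagicGo f n = is_magic_number_alt n := by
  intro f
  induction f with
  | zero =>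
    intro n hf
    rw [pvMagicGo, is_magic_number_alt, if_pos (by omega : n ≤ 9)]
  | succ f ih =>
    intro n hf
    by_cases h9 : n ≤ 9
    · rw [pvMagicGo, if_pos h9, is_magic_number_alt, if_pos h9]
    · rw [pvMagicGo, if_neg h9]
      obtain ⟨-, h1, h2, h3, h4⟩ :=
        pvDigitLoop_facts n.toNat n 0 (by omega) le_rfl
      set m := pvDigitLoop n.toNat n 0 with hm
      have hlt : m < n := h4 (by omega)
      rw [ih m (by omega)]
      simp only [is_magic_number_alt,
        PySem.Int.mod_eq_emod_of_pos (show (0:Int) < 9 by omega)]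
      rw [if_neg h9]
      by_cases hms : m ≤ 9
      · rw [if_pos hms]
        have e1 : (m == 1) = decide (m = 1) := by
          by_cases h : m = 1 <;> simp [h]
        have e2 : ((n % 9 : Int) == 1) = decide (n % 9 = 1) := by
          by_cases h : n % 9 = 1 <;> simp [h]
        rw [e1, e2, decide_eq_decide]
        omega
      · rw [if_neg hms, h2]

-- ===== VERDICT (by name: the statement is the Claim_ definition above) =====
theorem is_magic_number_spec : Claim_equal_is_magic_number := by
  intro n _
  unfold Spec_is_magic_number is_magic_number
  exact pvMagicGo_eq_alt n.toNat n le_rfl
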